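-- pv_equiv track=rewrite | github.com/FranciszekPodlach/cipaAI | main.py | distribute_counts_across_chunks
-- ===== SOURCE A (Python) =====
-- from typing import List
--
-- def distribute_counts_across_chunks(total_count: int, chunks_count: int) -> List[int]:
--     if chunks_count <= 0: return []
--     base = total_count // chunks_count
--     remainder = total_count % chunks_count
--     distribution = []
--     for i in range(chunks_count):
--         per = base + (1 if i < remainder else 0)
--         if per <= 0: per = 1
--         distribution.append(per)
--     while sum(distribution) > total_count:
--         for i in range(len(distribution)-1, -1, -1):
--             if distribution[i] > 0 and sum(distribution) > total_count:
--                 distribution[i] -= 1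
--     return [d for d in distribution if d > 0]
-- ===== SOURCE B (Python) =====
-- from typing import List
--
-- def distribute_counts_across_chunks(total_count: int, chunks_count: int) -> List[int]:
--     if chunks_count <= 0 or total_count <= 0:
--         return []
--     if total_count < chunks_count:
--         return [1] * total_count
--     base, rem = divmod(total_count, chunks_count)
--     return [base + 1] * rem + [base] * (chunks_count - rem)
-- ===== Notes on version B (the rewrite author's own statement) =====
-- stated objective: faster
-- what changed: B replaces A's build-then-repeatedly-decrement loops (with sum() recomputed inside the inner scan) by a direct closed-form construction: [] for non-positive inputs, [1]*total_count when total_count < chunks_count, else the base/remainder split [base+1]*rem + [base]*(chunks-rem); Pre_ only excludes total_count < 0 with chunks_count > 0, where A loops forever.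
import Mathlib
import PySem

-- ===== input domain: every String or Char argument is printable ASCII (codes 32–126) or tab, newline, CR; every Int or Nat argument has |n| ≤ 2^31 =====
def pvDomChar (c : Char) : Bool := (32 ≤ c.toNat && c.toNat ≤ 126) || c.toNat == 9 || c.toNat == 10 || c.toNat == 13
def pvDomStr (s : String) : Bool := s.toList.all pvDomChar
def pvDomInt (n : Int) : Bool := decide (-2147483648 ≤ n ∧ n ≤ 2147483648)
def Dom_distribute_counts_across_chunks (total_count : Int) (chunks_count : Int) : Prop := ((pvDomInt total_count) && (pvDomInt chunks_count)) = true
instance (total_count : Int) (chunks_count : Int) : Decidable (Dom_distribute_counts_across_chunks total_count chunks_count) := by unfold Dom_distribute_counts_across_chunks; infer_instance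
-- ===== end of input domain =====

-- B replaces A's build-then-repeatedly-decrement loops by a direct closed-form construction (faster).


-- ===== PORT A =====
-- inner 'for i in range(len(distribution)-1, -1, -1)': structural countdown over the
-- (always nonnegative, in-range) index; List.getD/List.set are exact for such indices.
def pvPassA (total : Int) : List Int → Nat → List Int
  | dist, 0 => dist
  | dist, k+1 =>
      let v := dist.getD k 0
      let d := if 0 < v ∧ total < dist.sum then dist.set k (v - 1) else dist
      pvPassA total d k

-- 'while sum(distribution) > total_count': fuel = (sum - total) + 1; under Pre_ each executed
-- pass strictly decreases the sum, so the fuel is never exhausted (outside Pre_ Python diverges).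
def pvWhileA (total : Int) : List Int → Nat → List Int
  | dist, 0 => dist
  | dist, f+1 => if total < dist.sum then pvWhileA total (pvPassA total dist dist.length) f else dist

-- 'for i in range(chunks_count): … distribution.append(per)'
def pvBuildA (base : Int) (remainder : Int) (chunks_count : Int) : List Int :=
  (PySem.List.pyRange 0 chunks_count 1).foldl
    (fun acc i =>
      acc ++ [if base + (if i < remainder then 1 else 0) ≤ 0 then 1
              else base + (if i < remainder then 1 else 0)]) []

def pvFinishA (total : Int) (distribution : List Int) : List Int :=
  (pvWhileA total distribution ((distribution.sum - total).toNat + 1)).filter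
    (fun d => decide (0 < d))

def distribute_counts_across_chunks (total_count : Int) (chunks_count : Int) : List Int :=
  if chunks_count ≤ 0 then []
  else
    pvFinishA total_count
      (pvBuildA (PySem.Int.floordiv total_count chunks_count)
        (PySem.Int.mod total_count chunks_count) chunks_count)

-- ===== PORT B =====
def distribute_counts_across_chunks_alt (total_count : Int) (chunks_count : Int) : List Int :=
  if chunks_count ≤ 0 ∨ total_count ≤ 0 then []
  else if total_count < chunks_count then List.replicate total_count.toNat 1
  else
    List.replicate (PySem.Int.mod total_count chunks_count).toNat
        (PySem.Int.floordiv total_count chunks_count + 1)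
      ++ List.replicate (chunks_count - PySem.Int.mod total_count chunks_count).toNat
        (PySem.Int.floordiv total_count chunks_count)

-- ===== PRECONDITION & SPEC =====
-- Pre_ excludes only total_count < 0 with chunks_count > 0: there A's while-loop never
-- terminates (the entries never go below 0, so the sum never drops below 0 > total_count).
def Pre_distribute_counts_across_chunks (total_count : Int) (chunks_count : Int) : Prop :=
  chunks_count ≤ 0 ∨ 0 ≤ total_count
instance (total_count : Int) (chunks_count : Int) : Decidable (Pre_distribute_counts_across_chunks total_count chunks_count) := by unfold Pre_distribute_counts_across_chunks; infer_instance

def pvWitness_distribute_counts_across_chunks : Int × Int := (5, 3)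

def Spec_distribute_counts_across_chunks (total_count : Int) (chunks_count : Int) (out : List Int) : Prop := out = distribute_counts_across_chunks_alt total_count chunks_count
instance (total_count : Int) (chunks_count : Int) (out : List Int) : Decidable (Spec_distribute_counts_across_chunks total_count chunks_count out) := by unfold Spec_distribute_counts_across_chunks; infer_instance

-- ===== CLAIM (what is proved, stated in full; the proofs are below) =====
def Claim_equal_distribute_counts_across_chunks : Prop := ∀ (total_count : Int) (chunks_count : Int), Dom_distribute_counts_across_chunks total_count chunks_count → Pre_distribute_counts_across_chunks total_count chunks_count → Spec_distribute_counts_across_chunks total_count chunks_count (distribute_counts_across_chunks total_count chunks_count)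

-- ===== LEMMAS AND PROOFS =====

lemma pvFoldl_append_map {α β : Type} (f : α → β) :
    ∀ (xs : List α) (acc : List β), xs.foldl (fun a i => a ++ [f i]) acc = acc ++ xs.map f := by
  intro xs
  induction xs with
  | nil => intro acc; simp [List.foldl]
  | cons x xs ih => intro acc; simp [List.foldl, ih]

lemma pvMap_range_const (n : Nat) (g : Nat → Int) (c : Int) (h : ∀ k, k < n → g k = c) :
    (List.range n).map g = List.replicate n c := by
  induction n with
  | zero => simp
  | succ n ih =>
      rw [List.range_succ, List.map_append, List.replicate_succ']
      rw [ih (fun k hk => h k (by omega))]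
      simp [h n (by omega)]

lemma pvMap_range_split (n r : Nat) (hr : r ≤ n) (g : Nat → Int) (a b : Int)
    (ha : ∀ k, k < r → g k = a) (hb : ∀ k, r ≤ k → k < n → g k = b) :
    (List.range n).map g = List.replicate r a ++ List.replicate (n - r) b := by
  have hn : n = r + (n - r) := by omega
  rw [hn, List.range_add, List.map_append, List.map_map]
  have hL := pvMap_range_const r g a ha
  have hR := pvMap_range_const (n - r) (fun k => g (r + k)) b (fun k hk => hb (r + k) (by omega) (by omega))
  have hrr : r + (n - r) - r = n - r := by omega
  rw [hrr]
  rw [show (g ∘ fun x => r + x) = (fun k => g (r + k)) from rfl]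
  rw [hL, hR]

lemma pvSum_replicate (n : Nat) (x : Int) : (List.replicate n x).sum = (n : Int) * x := by
  simp [List.sum_replicate]

lemma pvPass_noop (t : Int) : ∀ (k : Nat) (dist : List Int), dist.sum ≤ t → pvPassA t dist k = dist := by
  intro k
  induction k with
  | zero => intro dist _; rfl
  | succ k ih =>
      intro dist h
      have hcnd : ¬ (0 < dist.getD k 0 ∧ t < dist.sum) := by
        rintro ⟨_, h2⟩; omega
      rw [pvPassA]
      simp only [if_neg hcnd]
      exact ih dist h

lemma pvRep_split (k m : Nat) (x : Int) :
    List.replicate (k+1) x ++ List.replicate m 0 = List.replicate k x ++ (x :: List.replicate m 0) := by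
  rw [List.replicate_succ', List.append_assoc]; rfl

lemma pvPass_ones (t : Int) (ht : 0 ≤ t) : ∀ (k m : Nat),
    pvPassA t (List.replicate k 1 ++ List.replicate m 0) k
      = List.replicate (min k t.toNat) 1 ++ List.replicate (k + m - min k t.toNat) 0 := by
  intro k
  induction k with
  | zero => intro m; simp [pvPassA]
  | succ k ih =>
      intro m
      have hsplit := pvRep_split k m (1 : Int)
      have hget : (List.replicate (k+1) (1:Int) ++ List.replicate m 0).getD k 0 = 1 := by
        rw [hsplit]
        simp [List.getD_eq_getElem?_getD]
      have hsum : (List.replicate (k+1) (1:Int) ++ List.replicate m 0).sum = (k : Int) + 1 := by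
        rw [List.sum_append, pvSum_replicate, pvSum_replicate]
        push_cast; ring
      by_cases hc : t < (k : Int) + 1
      · -- decrement index k to 0
        have htk : t.toNat ≤ k := by omega
        have hset : (List.replicate (k+1) (1:Int) ++ List.replicate m 0).set k 0
            = List.replicate k 1 ++ List.replicate (m+1) 0 := by
          rw [hsplit, List.set_append]
          simp [List.replicate_succ]
        simp only [pvPassA, hget, hsum]
        rw [if_pos ⟨by norm_num, by exact_mod_cast hc⟩]
        have h01 : (1 : Int) - 1 = 0 := by ring
        rw [h01, hset, ih (m+1)]
        have h1 : min k t.toNat = t.toNat := by omega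
        have h2 : min (k+1) t.toNat = t.toNat := by omega
        rw [h1, h2]
        congr 1
        congr 1
        omega
      · -- sum ≤ t: nothing changes from here on
        simp only [pvPassA, hget, hsum]
        rw [if_neg (by rintro ⟨_, h2⟩; exact hc h2)]
        rw [pvPass_noop t k _ (by rw [hsum]; omega)]
        have h2 : min (k+1) t.toNat = k+1 := by omega
        rw [h2]
        have h3 : k + 1 + m - (k+1) = m := by omega
        rw [h3]

lemma pvFilter_replicate_pos (n : Nat) (x : Int) (hx : 0 < x) :
    (List.replicate n x).filter (fun d => decide (0 < d)) = List.replicate n x := by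
  induction n with
  | zero => simp
  | succ n ih => simp [List.replicate_succ, hx, ih]

lemma pvFilter_replicate_zero (n : Nat) :
    (List.replicate n (0:Int)).filter (fun d => decide (0 < d)) = [] := by
  induction n with
  | zero => simp
  | succ n ih => simp [List.replicate_succ, ih]

-- the per-index value of the build loop (as a function of the Nat index)
def pvG (t c : Int) (k : Nat) : Int :=
  if PySem.Int.floordiv t c + (if (k:Int) < PySem.Int.mod t c then 1 else 0) ≤ 0 then 1
  else PySem.Int.floordiv t c + (if (k:Int) < PySem.Int.mod t c then 1 else 0)

-- the built list, as a map over List.range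
lemma pvBuild_eq (t c : Int) :
    pvBuildA (PySem.Int.floordiv t c) (PySem.Int.mod t c) c
      = (List.range c.toNat).map (pvG t c) := by
  unfold pvBuildA
  rw [pvFoldl_append_map, PySem.List.pyRange_one, List.map_map, List.nil_append]
  have h0 : (c - 0).toNat = c.toNat := by norm_num
  rw [h0]
  apply List.map_congr_left
  intro k _
  simp [pvG, Function.comp]

-- ===== VERDICT (by name: the statement is the Claim_ definition above) =====
theorem distribute_counts_across_chunks_spec : Claim_equal_distribute_counts_across_chunks := by
  intro t c _ hpre
  unfold Spec_distribute_counts_across_chunks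
  unfold distribute_counts_across_chunks distribute_counts_across_chunks_alt
  by_cases hc0 : c ≤ 0
  · simp [hc0]
  · have hc : 0 < c := by omega
    have ht : 0 ≤ t := hpre.resolve_left (by omega)
    rw [if_neg (by omega)]
    rw [pvBuild_eq t c]
    unfold pvFinishA
    have hfd : PySem.Int.floordiv t c = t / c := PySem.Int.floordiv_eq_ediv_of_pos hc
    have hmd : PySem.Int.mod t c = t % c := PySem.Int.mod_eq_emod_of_pos hc
    by_cases htc : t < c
    · -- 0 ≤ t < c : base = 0, rem = t, built list is all ones
      have hbase : PySem.Int.floordiv t c = 0 := by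
        rw [hfd]; exact Int.ediv_eq_zero_of_lt ht htc
      have hrem : PySem.Int.mod t c = t := by
        rw [hmd]; exact Int.emod_eq_of_lt ht htc
      have hones : (List.range c.toNat).map (pvG t c) = List.replicate c.toNat 1 := by
        apply pvMap_range_const
        intro k _
        by_cases hk : (k:Int) < t <;> simp [pvG, hbase, hrem, hk]
      rw [hones]
      have hsum : (List.replicate c.toNat (1:Int)).sum = c := by
        rw [pvSum_replicate]; simp; omega
      -- fuel is at least 2; the single pass brings the sum down to t
      have hfuel : ((List.replicate c.toNat (1:Int)).sum - t).toNat + 1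
          = ((c - t).toNat - 1) + 1 + 1 := by rw [hsum]; omega
      rw [hfuel]
      rw [pvWhileA]
      rw [if_pos (by rw [hsum]; omega)]
      have hlen : (List.replicate c.toNat (1:Int)).length = c.toNat := by simp
      have hpass : pvPassA t (List.replicate c.toNat (1:Int)) (List.replicate c.toNat (1:Int)).length
          = List.replicate t.toNat 1 ++ List.replicate (c.toNat - t.toNat) 0 := by
        rw [hlen]
        have := pvPass_ones t ht c.toNat 0
        simp only [List.replicate_zero, List.append_nil] at this
        rw [this]
        have hmin : min c.toNat t.toNat = t.toNat := by omega
        rw [hmin]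
        norm_num
      rw [hpass, pvWhileA]
      rw [if_neg (by
        rw [List.sum_append, pvSum_replicate, pvSum_replicate]
        simp
        omega)]
      rw [List.filter_append, pvFilter_replicate_pos t.toNat 1 (by norm_num),
          pvFilter_replicate_zero, List.append_nil]
      by_cases ht0 : t ≤ 0
      · have : t = 0 := by omega
        simp [this]
      · rw [if_neg (by omega), if_pos htc]
    · -- c ≤ t : exact base/remainder split, sum = t, while-loop body never runs
      have htc' : c ≤ t := by omega
      have hbase1 : 1 ≤ PySem.Int.floordiv t c := by
        rw [hfd]
        have := Int.le_ediv_iff_mul_le hc (a := 1) (b := t)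
        rw [this]; omega
      have hrem0 : 0 ≤ PySem.Int.mod t c := by rw [hmd]; exact Int.emod_nonneg t (by omega)
      have hremc : PySem.Int.mod t c < c := by rw [hmd]; exact Int.emod_lt_of_pos t hc
      set b := PySem.Int.floordiv t c with hb
      set r := PySem.Int.mod t c with hr
      have hsplit : (List.range c.toNat).map (pvG t c)
          = List.replicate r.toNat (b+1) ++ List.replicate (c.toNat - r.toNat) b := by
        apply pvMap_range_split c.toNat r.toNat (by omega)
        · intro k hk
          have hklt : (k:Int) < r := by omega
          simp [pvG, ← hb, ← hr, hklt]; omega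
        · intro k hk _
          have hklt : ¬ ((k:Int) < r) := by omega
          simp [pvG, ← hb, ← hr, hklt]; omega
      rw [hsplit]
      have hdm : b * c + r = t := by rw [hb, hr]; exact PySem.Int.floordiv_mul_add_mod t c
      have hsum : (List.replicate r.toNat (b+1) ++ List.replicate (c.toNat - r.toNat) b).sum = t := by
        rw [List.sum_append, pvSum_replicate, pvSum_replicate]
        have h1 : ((r.toNat : Int)) = r := by omega
        have h2 : (((c.toNat - r.toNat : Nat)) : Int) = c - r := by omega
        rw [h1, h2]; ring_nf; linarith [hdm]
      rw [hsum]
      have : (t - t).toNat + 1 = 0 + 1 := by omega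
      rw [this, pvWhileA, if_neg (by rw [hsum]; omega)]
      rw [List.filter_append, pvFilter_replicate_pos _ _ (by omega),
          pvFilter_replicate_pos _ _ (by omega)]
      rw [if_neg (by omega), if_neg (by omega)]
      have : (c - r).toNat = c.toNat - r.toNat := by omega
      rw [this]
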